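-- pv_equiv track=rewrite | github.com/micakaima/TDA_tps | Tp1/main.py | comparar_datos
-- ===== SOURCE A (Python) =====
-- def contar_apariciones(intervalos):
--     intervalos_todos = {}
--     for j in range(len(intervalos)):
--         t_i, e_i = intervalos[j][0], intervalos[j][1]
--         if (t_i,e_i) not in intervalos_todos:
--             intervalos_todos[(t_i,e_i)] = 0
--         intervalos_todos[(t_i,e_i)] += 1
--     return intervalos_todos
--
-- def comparar_datos(intervalos, transacciones):
--     coincidencias = []
--     intervalos_todos = contar_apariciones(intervalos)
--
--     for i in range(len(transacciones)):
--         s_i = transacciones[i]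
--         intervalo_i = ()
--         min_fin = float('inf')
--
--         for j in range(len(intervalos)):
--             t_i, e_i = intervalos[j][0], intervalos[j][1]
--             if intervalos_todos[((t_i,e_i))] <= 0:
--                 continue
--             if (t_i-e_i) <= s_i <= (t_i+e_i) and (t_i + e_i) < min_fin:
--                 min_fin = t_i + e_i
--                 intervalo_i = (t_i, e_i)
--
--         if not intervalo_i:
--             return False, []
--
--         intervalos_todos[intervalo_i] -= 1
--         coincidencias.append((s_i, intervalo_i[0], intervalo_i[1]))
--
--     return True, coincidencias
-- ===== SOURCE B (Python) =====
-- def comparar_datos(intervalos, transacciones):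
--     # Count each distinct interval once, sort the distinct intervals by their
--     # upper end (stable, so ties keep first-occurrence order), then serve each
--     # transaction with the first remaining interval in that order that covers it.
--     counts = {}
--     for p in intervalos:
--         k = (p[0], p[1])
--         counts[k] = counts.get(k, 0) + 1
--     order = sorted(counts, key=lambda k: k[0] + k[1])
--     coincidencias = []
--     for s in transacciones:
--         for k in order:
--             t, e = k
--             if counts[k] > 0 and t - e <= s <= t + e:
--                 counts[k] -= 1
--                 coincidencias.append((s, t, e))
--                 break
--         else:
--             return False, []
--     return True, coincidencias
-- ===== Notes on version B (the rewrite author's own statement) =====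
-- stated objective: alternative
-- what changed: Instead of A's per-transaction linear scan over every interval entry while tracking a running minimum upper end, B counts each distinct interval once, sorts the distinct intervals by upper end (stable sort keeps first-occurrence tie-break), and serves each transaction with the first remaining covering interval in that sorted order.
import Mathlib
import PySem

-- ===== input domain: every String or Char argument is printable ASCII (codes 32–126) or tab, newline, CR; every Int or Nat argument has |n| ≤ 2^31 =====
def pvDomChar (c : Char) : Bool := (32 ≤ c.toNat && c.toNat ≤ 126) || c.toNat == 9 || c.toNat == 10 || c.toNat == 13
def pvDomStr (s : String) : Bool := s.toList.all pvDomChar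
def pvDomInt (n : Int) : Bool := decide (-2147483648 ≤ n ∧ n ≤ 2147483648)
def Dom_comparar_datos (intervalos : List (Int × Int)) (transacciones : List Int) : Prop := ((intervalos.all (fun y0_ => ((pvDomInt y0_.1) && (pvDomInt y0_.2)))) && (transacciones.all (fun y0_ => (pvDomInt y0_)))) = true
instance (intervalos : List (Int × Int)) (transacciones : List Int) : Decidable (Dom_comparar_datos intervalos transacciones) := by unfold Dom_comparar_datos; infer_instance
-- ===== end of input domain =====

-- B replaces A's per-transaction scan over ALL interval entries (tracking a running
-- minimum upper end) by counting distinct intervals once, sorting them by upper end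
-- (stable), and taking the first remaining covering interval per transaction
-- (objective: alternative sort-then-scan decomposition).

-- ===== PORT A =====

-- `min_fin = float('inf')` is modelled as `Option Int` (`none` = infinity);
-- `t+e < min_fin` is `optLtB min_fin (t+e)`; the empty tuple `()` is `none`.
def optLtB (o : Option Int) (v : Int) : Bool :=
  match o with
  | none => true
  | some m => decide (v < m)

def contar_apariciones (intervalos : List (Int × Int)) : PySem.Dict (Int × Int) Int :=
  intervalos.foldl (fun d p =>
    let k := (p.1, p.2)
    let d' := if d.contains k then d else d.insert k 0
    d'.modify k 0 (· + 1)) PySem.Dict.empty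

-- the inner `for j in range(len(intervalos))` loop of A, for one transaction s
def cdInner (d : PySem.Dict (Int × Int) Int) (s : Int) (intervalos : List (Int × Int)) :
    Option Int × Option (Int × Int) :=
  intervalos.foldl (fun st p =>
    let t := p.1
    let e := p.2
    if d.getD (t, e) 0 ≤ 0 then st
    else if (decide (t - e ≤ s) && decide (s ≤ t + e) && optLtB st.1 (t + e)) = true then
      (some (t + e), some (t, e))
    else st) (none, none)

-- the outer `for i in range(len(transacciones))` loop of A
def cdLoop (intervalos : List (Int × Int)) (d : PySem.Dict (Int × Int) Int)
    (acc : List (Int × Int × Int)) : List Int → Bool × (List (Int × Int × Int))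
  | [] => (true, acc)
  | s :: rest =>
    match (cdInner d s intervalos).2 with
    | none => (false, [])
    | some k => cdLoop intervalos (d.modify k 0 (· - 1)) (acc ++ [(s, k.1, k.2)]) rest

def comparar_datos (intervalos : List (Int × Int)) (transacciones : List Int) :
    Bool × (List (Int × Int × Int)) :=
  cdLoop intervalos (contar_apariciones intervalos) [] transacciones

-- ===== PORT B =====

def cdKey (k : Int × Int) : Int := k.1 + k.2

-- `counts[k] > 0 and t - e <= s <= t + e`
def cdElig (d : PySem.Dict (Int × Int) Int) (s : Int) (k : Int × Int) : Bool :=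
  decide (0 < d.getD k 0) && decide (k.1 - k.2 ≤ s) && decide (s ≤ k.1 + k.2)

-- B's `for s in transacciones` loop: first covering interval in sorted order
def cdAltLoop (order : List (Int × Int)) (d : PySem.Dict (Int × Int) Int)
    (acc : List (Int × Int × Int)) : List Int → Bool × (List (Int × Int × Int))
  | [] => (true, acc)
  | s :: rest =>
    match order.find? (cdElig d s) with
    | none => (false, [])
    | some k => cdAltLoop order (d.modify k 0 (· - 1)) (acc ++ [(s, k.1, k.2)]) rest

def comparar_datos_alt (intervalos : List (Int × Int)) (transacciones : List Int) :
    Bool × (List (Int × Int × Int)) :=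
  let counts := intervalos.foldl
    (fun d p => d.insert (p.1, p.2) (d.getD (p.1, p.2) 0 + 1)) PySem.Dict.empty
  let order := PySem.List.sorted counts.keys cdKey
  cdAltLoop order counts [] transacciones

-- ===== PRECONDITION & SPEC =====
def Spec_comparar_datos (intervalos : List (Int × Int)) (transacciones : List Int) (out : Bool × (List (Int × Int × Int))) : Prop := out = comparar_datos_alt intervalos transacciones
instance (intervalos : List (Int × Int)) (transacciones : List Int) (out : Bool × (List (Int × Int × Int))) : Decidable (Spec_comparar_datos intervalos transacciones out) := by unfold Spec_comparar_datos; infer_instance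

-- ===== CLAIM (what is proved, stated in full; the proofs are below) =====
def Claim_equal_comparar_datos : Prop := ∀ (intervalos : List (Int × Int)) (transacciones : List Int), Dom_comparar_datos intervalos transacciones → Spec_comparar_datos intervalos transacciones (comparar_datos intervalos transacciones)

-- ===== LEMMAS AND PROOFS =====

lemma contar_step_eq (d : PySem.Dict (Int × Int) Int) (p : Int × Int) :
    (let k := (p.1, p.2)
     let d' := if d.contains k then d else d.insert k 0
     d'.modify k 0 (· + 1)) = d.insert (p.1, p.2) (d.getD (p.1, p.2) 0 + 1) := by
  by_cases h : d.contains (p.1, p.2)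
  · simp [h, PySem.Dict.modify]
  · have h' : d.contains (p.1, p.2) = false := by simpa using h
    simp [PySem.Dict.modify, PySem.Dict.getD_insert_self, PySem.Dict.insert_insert_self,
      PySem.Dict.getD_of_not_contains d 0 h', h']

lemma contar_aux (I : List (Int × Int)) :
    ∀ (d : PySem.Dict (Int × Int) Int),
      I.foldl (fun d p =>
        let k := (p.1, p.2)
        let d' := if d.contains k then d else d.insert k 0
        d'.modify k 0 (· + 1)) d =
      I.foldl (fun d p => d.insert (p.1, p.2) (d.getD (p.1, p.2) 0 + 1)) d := by
  induction I with
  | nil => intro d; rfl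
  | cons p I ih => intro d; rw [List.foldl_cons, List.foldl_cons, contar_step_eq]; exact ih _

lemma contar_eq (intervalos : List (Int × Int)) :
    contar_apariciones intervalos =
      intervalos.foldl (fun d p => d.insert (p.1, p.2) (d.getD (p.1, p.2) 0 + 1))
        PySem.Dict.empty := contar_aux intervalos _

-- pack the best-so-far interval together with its upper end, as A's state carries it
def omap : Option (Int × Int) → Option Int × Option (Int × Int)
  | none => (none, none)
  | some k => (some (cdKey k), some k)

lemma omap_snd (o : Option (Int × Int)) : (omap o).2 = o := by cases o <;> rfl

def minStep (q : Int × Int → Bool) (b : Option (Int × Int)) (k : Int × Int) :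
    Option (Int × Int) :=
  if q k then
    match b with
    | none => some k
    | some m => if cdKey k < cdKey m then some k else some m
  else b

lemma inner_aux (d : PySem.Dict (Int × Int) Int) (s : Int) (I : List (Int × Int)) :
    ∀ (b : Option (Int × Int)),
      I.foldl (fun st p =>
        let t := p.1
        let e := p.2
        if d.getD (t, e) 0 ≤ 0 then st
        else if (decide (t - e ≤ s) && decide (s ≤ t + e) && optLtB st.1 (t + e)) = true then
          (some (t + e), some (t, e))
        else st) (omap b) =
      omap (I.foldl (minStep (cdElig d s)) b) := by
  induction I with
  | nil => intro b; rfl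
  | cons p I ih =>
    intro b
    rw [List.foldl_cons, List.foldl_cons]
    have hstep : (let t := p.1
        let e := p.2
        if d.getD (t, e) 0 ≤ 0 then omap b
        else if (decide (t - e ≤ s) && decide (s ≤ t + e) && optLtB (omap b).1 (t + e)) = true then
          (some (t + e), some (t, e))
        else omap b) = omap (minStep (cdElig d s) b p) := by
      cases b <;>
        · simp only [minStep, cdElig, cdKey, optLtB, omap, Prod.mk.eta, Bool.and_eq_true,
            decide_eq_true_eq]
          split_ifs <;> simp_all [omap] <;> omega
    rw [hstep]; exact ih _

lemma min?_filter_eq (q : Int × Int → Bool) (I : List (Int × Int)) :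
    PySem.List.min? (I.filter q) cdKey = I.foldl (minStep q) none := by
  rw [PySem.List.min?, List.foldl_filter]
  congr 1
  funext b k
  cases b <;> rfl

lemma cdInner_eq (d : PySem.Dict (Int × Int) Int) (s : Int) (I : List (Int × Int)) :
    cdInner d s I = omap (PySem.List.min? (I.filter (cdElig d s)) cdKey) := by
  rw [min?_filter_eq, cdInner,
    show ((none, none) : Option Int × Option (Int × Int)) = omap none from rfl]
  exact inner_aux d s I none

lemma min?_append_singleton (N : List (Int × Int)) (x : Int × Int) :
    PySem.List.min? (N ++ [x]) cdKey =
      match PySem.List.min? N cdKey with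
      | none => some x
      | some m => if cdKey x < cdKey m then some x else some m := by
  cases hN : PySem.List.min? N cdKey with
  | none => simp only [PySem.List.min?] at hN ⊢; rw [List.foldl_append, hN]; rfl
  | some m => simp only [PySem.List.min?] at hN ⊢; rw [List.foldl_append, hN]; rfl

lemma find?_insertBy (q : Int × Int → Bool) (x : Int × Int) :
    ∀ (acc : List (Int × Int)), acc.Pairwise (fun a b => cdKey a ≤ cdKey b) →
      (PySem.List.insertBy (fun a b => decide (cdKey a < cdKey b)) x acc).find? q =
        match acc.find? q with
        | none => if q x then some x else none
        | some m => if q x && decide (cdKey x < cdKey m) then some x else some m := by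
  intro acc
  induction acc with
  | nil =>
    intro _
    by_cases hx : q x = true <;> simp [PySem.List.insertBy, List.find?, hx]
  | cons y ys ih =>
    intro hp
    rw [List.pairwise_cons] at hp
    by_cases h1 : decide (cdKey x < cdKey y) = true
    · rw [show PySem.List.insertBy (fun a b => decide (cdKey a < cdKey b)) x (y :: ys) =
        x :: y :: ys by simp [PySem.List.insertBy, h1]]
      cases hf : (y :: ys).find? q with
      | none => by_cases hx : q x = true <;> simp [hx, hf]
      | some m =>
        have hmem := List.mem_of_find?_eq_some hf
        have hxy : cdKey x < cdKey y := of_decide_eq_true h1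
        have hxm : cdKey x < cdKey m := by
          rcases List.mem_cons.mp hmem with rfl | h
          · exact hxy
          · exact lt_of_lt_of_le hxy (hp.1 m h)
        by_cases hx : q x = true <;> simp [hx, hf, hxm]
    · rw [show PySem.List.insertBy (fun a b => decide (cdKey a < cdKey b)) x (y :: ys) =
        y :: PySem.List.insertBy (fun a b => decide (cdKey a < cdKey b)) x ys by
          simp [PySem.List.insertBy, h1]]
      have hxy : decide (cdKey x < cdKey y) = false := by simpa using h1
      by_cases hy : q y = true
      · simp [hy, hxy]
      · simp only [List.find?_cons, hy]
        rw [ih hp.2]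

lemma sorted_append_singleton (xs : List (Int × Int)) (x : Int × Int) :
    PySem.List.sorted (xs ++ [x]) cdKey =
      PySem.List.insertBy (fun a b => decide (cdKey a < cdKey b)) x
        (PySem.List.sorted xs cdKey) := by
  rw [PySem.List.sorted_eq_foldl_insertBy, PySem.List.sorted_eq_foldl_insertBy,
    List.foldl_append]
  rfl

lemma find?_sorted (I : List (Int × Int)) (q : Int × Int → Bool) :
    (PySem.List.sorted I cdKey).find? q = PySem.List.min? (I.filter q) cdKey := by
  induction I using List.reverseRecOn with
  | nil => rfl
  | append_singleton xs x ih =>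
    rw [sorted_append_singleton,
      find?_insertBy q x _ (PySem.List.sorted_pairwise xs cdKey), ih,
      List.filter_append]
    by_cases hx : q x = true
    · rw [show List.filter q [x] = [x] by simp [hx], min?_append_singleton]
      cases PySem.List.min? (xs.filter q) cdKey with
      | none => simp [hx]
      | some m => by_cases hlt : cdKey x < cdKey m <;> simp [hx, hlt]
    · rw [show List.filter q [x] = [] by simp [hx], List.append_nil]
      cases PySem.List.min? (xs.filter q) cdKey with
      | none => simp [hx]
      | some m => simp [hx]

lemma ofList_contains_eq (L : List (Int × Int)) (x : Int × Int) :
    (PySem.Set.ofList L).contains x = decide (x ∈ L) := by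
  simp [PySem.Set.contains, PySem.Set.mem_ofList]

lemma dedup_append_singleton (L : List (Int × Int)) (x : Int × Int) :
    PySem.List.dedup (L ++ [x]) =
      if x ∈ L then PySem.List.dedup L else PySem.List.dedup L ++ [x] := by
  rw [PySem.List.dedup_eq_ofList, PySem.List.dedup_eq_ofList, PySem.Set.ofList,
    PySem.Set.ofList, List.foldl_append,
    show List.foldl PySem.Set.add (List.foldl PySem.Set.add PySem.Set.empty L) [x]
      = PySem.Set.add (List.foldl PySem.Set.add PySem.Set.empty L) x from rfl,
    PySem.Set.add, show (List.foldl PySem.Set.add PySem.Set.empty L) = PySem.Set.ofList L from rfl,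
    ofList_contains_eq]
  by_cases hx : x ∈ L <;> simp [hx]

lemma min?_dedup_filter (I : List (Int × Int)) (q : Int × Int → Bool) :
    PySem.List.min? ((PySem.List.dedup I).filter q) cdKey =
      PySem.List.min? (I.filter q) cdKey := by
  induction I using List.reverseRecOn with
  | nil => rfl
  | append_singleton L x ih =>
    rw [dedup_append_singleton, List.filter_append]
    by_cases hqx : q x = true
    · rw [show List.filter q [x] = [x] by simp [hqx]]
      by_cases hx : x ∈ L
      · rw [if_pos hx, ih, min?_append_singleton]
        have hxf : x ∈ L.filter q := List.mem_filter.mpr ⟨hx, hqx⟩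
        cases hm : PySem.List.min? (L.filter q) cdKey with
        | none =>
          have hnil : List.filter q L = [] := (PySem.List.min?_eq_none_iff _ _).mp hm
          rw [hnil] at hxf; cases hxf
        | some m =>
          have hle := PySem.List.min?_isMin hm x hxf
          show some m = if cdKey x < cdKey m then some x else some m
          rw [if_neg (not_lt.mpr hle)]
      · rw [if_neg hx, List.filter_append,
          show List.filter q [x] = [x] by simp [hqx],
          min?_append_singleton, min?_append_singleton, ih]
    · rw [show List.filter q [x] = [] by simp [hqx], List.append_nil]
      by_cases hx : x ∈ L
      · rw [if_pos hx, ih]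
      · rw [if_neg hx, List.filter_append,
          show List.filter q [x] = [] by simp [hqx], List.append_nil, ih]

lemma inner_snd_eq (d : PySem.Dict (Int × Int) Int) (s : Int) (I : List (Int × Int)) :
    (cdInner d s I).2 = (PySem.List.sorted (PySem.List.dedup I) cdKey).find? (cdElig d s) := by
  rw [cdInner_eq, omap_snd, find?_sorted, min?_dedup_filter]

lemma loops_eq (I : List (Int × Int)) :
    ∀ (ts : List Int) (d : PySem.Dict (Int × Int) Int) (acc : List (Int × Int × Int)),
      cdLoop I d acc ts = cdAltLoop (PySem.List.sorted (PySem.List.dedup I) cdKey) d acc ts := by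
  intro ts
  induction ts with
  | nil => intro d acc; rfl
  | cons s rest ih =>
    intro d acc
    rw [cdLoop, cdAltLoop, ← inner_snd_eq d s I]
    cases (cdInner d s I).2 with
    | none => rfl
    | some k => exact ih _ _

-- ===== VERDICT (by name: the statement is the Claim_ definition above) =====
theorem comparar_datos_spec : Claim_equal_comparar_datos := by
  intro intervalos transacciones _
  unfold Spec_comparar_datos comparar_datos comparar_datos_alt
  dsimp only
  have hc : intervalos.foldl
      (fun d p => d.insert (p.1, p.2) (d.getD (p.1, p.2) 0 + 1)) PySem.Dict.empty
      = PySem.Dict.counter intervalos := by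
    rw [show (fun (d : PySem.Dict (Int × Int) Int) (p : Int × Int) =>
          d.insert (p.1, p.2) (d.getD (p.1, p.2) 0 + 1))
        = (fun (d : PySem.Dict (Int × Int) Int) (x : Int × Int) =>
          d.insert x (d.getD x 0 + 1)) from by funext d p; rfl]
    exact PySem.Dict.foldl_insert_getD_add_one_eq_counter intervalos
  rw [contar_eq, hc, PySem.Dict.keys_counter, ← PySem.List.dedup_eq_ofList]
  exact loops_eq intervalos transacciones (PySem.Dict.counter intervalos) []
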